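-- pv_equiv track=rewrite | github.com/DenisSkulovic/Finance_Django_Project | scraper/scraper_classes.py | truncate_text_data
-- ===== SOURCE A (Python) =====
-- def truncate_text_data(text_data: tuple, word_count_threshold: int) -> list:
--     spaces_count = 0
--     texts_to_keep = []
--     for text in text_data:
--         for char in text[1]:
--             if char == ' ':
--                 spaces_count += 1
--         texts_to_keep.append(text)
--         if spaces_count >= word_count_threshold:
--             return texts_to_keep
--     return text_data
-- ===== SOURCE B (Python) =====
-- def truncate_text_data(text_data: tuple, word_count_threshold: int) -> list:
--     def keep_prefix(items, remaining):
--         # returns the prefix up to (and including) the item that exhausts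
--         # `remaining` space budget, or None if the budget never runs out
--         if not items:
--             return None
--         head = items[0]
--         remaining -= head[1].count(' ')
--         if remaining <= 0:
--             return [head]
--         rest = keep_prefix(items[1:], remaining)
--         return None if rest is None else [head] + rest
--     kept = keep_prefix(list(text_data), word_count_threshold)
--     return kept if kept is not None else text_data
-- ===== Notes on version B (the rewrite author's own statement) =====
-- stated objective: alternative
-- what changed: Replaces A's iterative loop with a running space counter and growing kept-list by a structural recursion that decrements the remaining threshold per item and returns an Option-style prefix (None = threshold never reached), assembled front-to-back on the way out of the recursion. Space counting uses str.count instead of a per-character Python loop.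
import Mathlib
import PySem

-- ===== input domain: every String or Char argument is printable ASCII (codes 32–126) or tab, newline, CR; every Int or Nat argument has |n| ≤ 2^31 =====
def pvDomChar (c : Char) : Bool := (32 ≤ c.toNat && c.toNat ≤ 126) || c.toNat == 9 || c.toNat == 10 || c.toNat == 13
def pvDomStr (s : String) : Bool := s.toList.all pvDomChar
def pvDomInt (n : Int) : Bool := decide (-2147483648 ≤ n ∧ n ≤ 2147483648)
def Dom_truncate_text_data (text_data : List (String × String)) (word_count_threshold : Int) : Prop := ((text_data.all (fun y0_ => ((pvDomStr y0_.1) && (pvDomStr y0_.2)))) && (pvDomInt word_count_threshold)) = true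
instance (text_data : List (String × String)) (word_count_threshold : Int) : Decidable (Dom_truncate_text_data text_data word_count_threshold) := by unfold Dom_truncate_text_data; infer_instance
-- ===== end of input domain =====

-- B replaces A's iterative running-counter loop by a structural recursion that decrements the remaining threshold per item and returns an optional prefix (alternative, same cost).


-- ===== PORT A =====
-- the for-loop over text_data with the running spaces_count and texts_to_keep
def pvAgo (td : List (String × String)) (w : Int) :
    List (String × String) → Int → List (String × String) → List (String × String)
  | [], _, _ => td
  | t :: rest, spaces, keep =>
    -- inner 'for char in text[1]: if char == ' ': spaces_count += 1'
    let spaces' := t.2.toList.foldl (fun c ch => if ch = ' ' then c + 1 else c) spaces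
    let keep' := keep ++ [t]
    if spaces' ≥ w then keep' else pvAgo td w rest spaces' keep'

def truncate_text_data (text_data : List (String × String)) (word_count_threshold : Int) : List (String × String) :=
  pvAgo text_data word_count_threshold text_data 0 []

-- ===== PORT B =====
-- Source B's keep_prefix: recursion on the list, decrementing the remaining budget; none = budget never reached
def pvKeepPrefix : List (String × String) → Int → Option (List (String × String))
  | [], _ => none
  | t :: rest, remaining =>
    let r := remaining - (PySem.Str.count t.2 " " : Int)
    if r ≤ 0 then some [t]
    else
      match pvKeepPrefix rest r with
      | none => none
      | some k => some (t :: k)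

def truncate_text_data_alt (text_data : List (String × String)) (word_count_threshold : Int) : List (String × String) :=
  match pvKeepPrefix text_data word_count_threshold with
  | some k => k
  | none => text_data

-- ===== PRECONDITION & SPEC =====
def Spec_truncate_text_data (text_data : List (String × String)) (word_count_threshold : Int) (out : List (String × String)) : Prop := out = truncate_text_data_alt text_data word_count_threshold
instance (text_data : List (String × String)) (word_count_threshold : Int) (out : List (String × String)) : Decidable (Spec_truncate_text_data text_data word_count_threshold out) := by unfold Spec_truncate_text_data; infer_instance

-- ===== CLAIM (what is proved, stated in full; the proofs are below) =====
def Claim_equal_truncate_text_data : Prop := ∀ (text_data : List (String × String)) (word_count_threshold : Int), Dom_truncate_text_data text_data word_count_threshold → Spec_truncate_text_data text_data word_count_threshold (truncate_text_data text_data word_count_threshold)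

-- ===== LEMMAS AND PROOFS =====

-- number of ' ' characters of the second component
def pvCnt (t : String × String) : Int := (t.2.toList.count ' ' : Int)

theorem pv_count_go_single (c : Char) :
    ∀ (s : List Char) (fuel acc : Nat), s.length ≤ fuel →
      PySem.Chars.count.go [c] fuel s acc = acc + s.count c := by
  intro s
  induction s with
  | nil => intro fuel acc _; cases fuel <;> simp [PySem.Chars.count.go]
  | cons h t ih =>
    intro fuel acc hle
    cases fuel with
    | zero => simp at hle
    | succ f =>
      by_cases hc : h = c
      · subst hc
        have : List.isPrefixOf [h] (h :: t) = true := by simp [List.isPrefixOf]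
        simp only [PySem.Chars.count.go, this, if_pos]
        rw [show List.drop [h].length (h :: t) = t from rfl]
        rw [ih f (acc + 1) (by simpa using hle)]
        simp
        omega
      · have : List.isPrefixOf [c] (h :: t) = false := by
          simp [List.isPrefixOf]; exact fun e => hc e.symm
        simp only [PySem.Chars.count.go, this]
        rw [if_neg (by simp)]
        rw [ih f acc (by simpa using hle)]
        simp [hc]

theorem pv_strcount_eq (s : String) : (PySem.Str.count s " " : Int) = pvCnt ("", s) := by
  simp only [PySem.Str.count_eq, pvCnt]
  have : (" ".toList) = [' '] := rfl
  rw [this]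
  simp only [PySem.Chars.count, List.isEmpty]
  rw [pv_count_go_single ' ' s.toList s.toList.length 0 le_rfl]
  simp

-- A's inner character loop computes spaces + pvCnt t
theorem pv_inner_loop (t : String × String) (spaces : Int) :
    t.2.toList.foldl (fun c ch => if ch = ' ' then c + 1 else c) spaces = spaces + pvCnt t := by
  rw [PySem.List.foldl_ite_add_one]
  simp only [pvCnt, List.count_eq_countP]
  norm_num
  apply List.countP_congr
  intro a _
  simp

-- core correspondence: A's streaming loop over suffix l with counter c equals
-- B's recursion over l with remaining budget w - c
theorem pv_main (td : List (String × String)) (w : Int) :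
    ∀ (l : List (String × String)) (c : Int) (keep : List (String × String)),
      pvAgo td w l c keep =
        match pvKeepPrefix l (w - c) with
        | some k => keep ++ k
        | none => td := by
  intro l
  induction l with
  | nil => intro c keep; simp [pvAgo, pvKeepPrefix]
  | cons t r ih =>
    intro c keep
    simp only [pvAgo, pv_inner_loop, pvKeepPrefix]
    rw [pv_strcount_eq t.2]
    have hc : pvCnt ("", t.2) = pvCnt t := rfl
    rw [hc]
    by_cases h : c + pvCnt t ≥ w
    · rw [if_pos h, if_pos (by omega)]
    · rw [if_neg h, if_neg (by omega)]
      rw [ih (c + pvCnt t) (keep ++ [t])]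
      have he : w - c - pvCnt t = w - (c + pvCnt t) := by ring
      rw [he]
      cases pvKeepPrefix r (w - (c + pvCnt t)) <;> simp

-- ===== VERDICT (by name: the statement is the Claim_ definition above) =====
theorem truncate_text_data_spec : Claim_equal_truncate_text_data := by
  intro td w _
  simp only [Spec_truncate_text_data, truncate_text_data, truncate_text_data_alt]
  rw [pv_main td w td 0 []]
  have : w - 0 = w := by ring
  rw [this]
  cases pvKeepPrefix td w <;> simp
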